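-- pv_equiv track=rewrite | github.com/m-tkach/ProjectEuler | [044] Pentagon numbers/main.py | is_pentagon
-- ===== SOURCE A (Python) =====
-- MAX = 4000
--
-- def get_pentagon(x):
--     return x * (3 * x - 1)
--
-- def is_pentagon(x):
--     l, r = 0, MAX
--     while l + 1 < r:
--         m = (l + r) // 2
--         if get_pentagon(m) > x:
--             r = m
--         else:
--             l = m
--     return x == get_pentagon(l)
-- ===== SOURCE B (Python) =====
-- MAX = 4000
--
-- def get_pentagon(x):
--     return x * (3 * x - 1)
--
-- def is_pentagon(x):
--     return any(get_pentagon(m) == x for m in range(MAX))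
-- ===== Notes on version B (the rewrite author's own statement) =====
-- stated objective: simpler
-- what changed: Replaced the clamped binary search over indices 0..MAX with a direct membership scan: any(get_pentagon(m) == x for m in range(MAX)).
import Mathlib
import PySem

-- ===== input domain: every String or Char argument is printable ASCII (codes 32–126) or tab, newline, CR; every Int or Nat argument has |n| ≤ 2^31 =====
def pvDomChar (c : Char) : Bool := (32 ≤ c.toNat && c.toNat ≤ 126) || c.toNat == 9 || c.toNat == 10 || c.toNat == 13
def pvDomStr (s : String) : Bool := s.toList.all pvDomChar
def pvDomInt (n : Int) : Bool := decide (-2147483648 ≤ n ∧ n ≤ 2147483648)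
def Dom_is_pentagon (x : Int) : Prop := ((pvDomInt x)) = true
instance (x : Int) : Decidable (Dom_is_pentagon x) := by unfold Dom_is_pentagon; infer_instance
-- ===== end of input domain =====

-- B replaces A's binary search by a direct membership scan over the same index range 0..MAX-1 (objective: simpler).

-- ===== PORT A =====
def get_pentagon (x : Int) : Int := x * (3 * x - 1)

-- midpoint bounds, cited by penLoopA's decreasing_by
lemma pv_mid_bounds (l r : Int) (_h : l + 1 < r) :
    l < PySem.Int.floordiv (l + r) 2 ∧ PySem.Int.floordiv (l + r) 2 < r := by
  rw [PySem.Int.floordiv_eq_ediv_of_pos (by norm_num : (0:Int) < 2)]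
  omega

-- the while loop of A, recursion on r - l
def penLoopA (x l r : Int) : Int :=
  if h : l + 1 < r then
    let m := PySem.Int.floordiv (l + r) 2
    if get_pentagon m > x then penLoopA x l m else penLoopA x m r
  else l
termination_by (r - l).toNat
decreasing_by
  · have := pv_mid_bounds l r h; omega
  · have := pv_mid_bounds l r h; omega

def is_pentagon (x : Int) : Bool := x == get_pentagon (penLoopA x 0 4000)

-- ===== PORT B =====
def is_pentagon_alt (x : Int) : Bool :=
  (PySem.List.pyRange 0 4000 1).any (fun m => get_pentagon m == x)

-- ===== PRECONDITION & SPEC =====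
def Spec_is_pentagon (x : Int) (out : Bool) : Prop := out = is_pentagon_alt x
instance (x : Int) (out : Bool) : Decidable (Spec_is_pentagon x out) := by unfold Spec_is_pentagon; infer_instance

-- ===== CLAIM =====
def Claim_equal_is_pentagon : Prop := ∀ (x : Int), Dom_is_pentagon x → Spec_is_pentagon x (is_pentagon x)

-- ===== LEMMAS AND PROOFS =====
lemma pent_mono {a b : Int} (ha : 0 ≤ a) (hab : a < b) :
    get_pentagon a < get_pentagon b := by
  unfold get_pentagon; nlinarith

lemma penLoopA_spec (n : Nat) (x l r : Int) (hn : (r - l).toNat = n)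
    (h0 : 0 ≤ l) (hlr : l < r) :
    l ≤ penLoopA x l r ∧ penLoopA x l r < r ∧
      ((∃ m, l ≤ m ∧ m < r ∧ get_pentagon m = x) → get_pentagon (penLoopA x l r) = x) := by
  induction n using Nat.strong_induction_on generalizing l r with
  | _ n ih =>
    rw [penLoopA]
    by_cases h : l + 1 < r
    · have hmid := pv_mid_bounds l r h
      simp only [h, dite_true]
      set m := PySem.Int.floordiv (l + r) 2 with hm
      by_cases hgt : get_pentagon m > x
      · simp only [hgt, if_true]
        obtain ⟨h1, h2, h3⟩ :=
          ih (m - l).toNat (by omega) l m rfl h0 (by omega)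
        refine ⟨h1, by omega, ?_⟩
        rintro ⟨m', hm'l, hm'r, hm'x⟩
        apply h3
        refine ⟨m', hm'l, ?_, hm'x⟩
        by_contra hge
        have : get_pentagon m ≤ get_pentagon m' := by
          rcases lt_or_eq_of_le (by omega : m ≤ m') with hlt | heq
          · exact le_of_lt (pent_mono (by omega) hlt)
          · rw [heq]
        omega
      · simp only [hgt, if_false]
        obtain ⟨h1, h2, h3⟩ :=
          ih (r - m).toNat (by omega) m r rfl (by omega) (by omega)
        refine ⟨by omega, h2, ?_⟩
        rintro ⟨m', hm'l, hm'r, hm'x⟩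
        apply h3
        refine ⟨m', ?_, hm'r, hm'x⟩
        by_contra hlt
        have := pent_mono (by omega : (0:Int) ≤ m') (by omega : m' < m)
        omega
    · simp only [h, dite_false]
      refine ⟨le_refl l, hlr, ?_⟩
      rintro ⟨m', hm'l, hm'r, hm'x⟩
      have : m' = l := by omega
      rw [← this]; exact hm'x

lemma alt_iff (x : Int) :
    is_pentagon_alt x = true ↔ ∃ m, 0 ≤ m ∧ m < 4000 ∧ get_pentagon m = x := by
  unfold is_pentagon_alt
  simp only [List.any_eq_true, PySem.List.mem_pyRange_one, beq_iff_eq]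
  constructor
  · rintro ⟨m, ⟨h1, h2⟩, h3⟩; exact ⟨m, h1, h2, h3⟩
  · rintro ⟨m, h1, h2, h3⟩; exact ⟨m, ⟨h1, h2⟩, h3⟩

-- ===== VERDICT =====
theorem is_pentagon_spec : Claim_equal_is_pentagon := by
  intro x _
  unfold Spec_is_pentagon
  obtain ⟨h1, h2, h3⟩ :=
    penLoopA_spec ((4000 - 0 : Int)).toNat x 0 4000 rfl (le_refl 0) (by norm_num)
  by_cases hex : ∃ m, 0 ≤ m ∧ m < 4000 ∧ get_pentagon m = x
  · rw [(alt_iff x).mpr hex]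
    unfold is_pentagon
    exact beq_iff_eq.mpr (h3 hex).symm
  · have hB : is_pentagon_alt x = false := by
      rw [← Bool.not_eq_true, alt_iff x]; exact hex
    rw [hB]
    unfold is_pentagon
    rw [beq_eq_false_iff_ne]
    intro hx
    exact hex ⟨penLoopA x 0 4000, h1, h2, hx.symm⟩
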